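-- pv_equiv track=rewrite | github.com/jeanlukeminchella/sheetsmithy2014 | Race.py | findSubrace
-- ===== SOURCE A (Python) =====
-- def findSubrace(arg, subraces):
--     subrace = ""
--     for a in arg:
--         if "subrace-" in a:
--             x = a.split("-")
--             if x[1] in subraces:
--                 subrace = x[1]
--     if subrace == "":
--         subrace = subraces[0]
--     return subrace
-- ===== SOURCE B (Python) =====
-- def findSubrace(arg, subraces):
--     # scan from the end and return the first (i.e. overall last) valid tag
--     for a in reversed(arg):
--         if "subrace-" in a:
--             t = a.split("-")[1]
--             if t in subraces:
--                 return t
--     return subraces[0]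
-- ===== Notes on version B (the rewrite author's own statement) =====
-- stated objective: simpler
-- what changed: Replaces the forward keep-last-overwrite scan with a backwards early-exit search that returns the first match from the end (the last forward match) and falls through to subraces[0].
-- outside the precondition, e.g. on findSubrace([], []): A raises IndexError, B raises IndexError; on findSubrace(['subrace--x'], ['z', '']): A returns 'z', B returns ''
import Mathlib
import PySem

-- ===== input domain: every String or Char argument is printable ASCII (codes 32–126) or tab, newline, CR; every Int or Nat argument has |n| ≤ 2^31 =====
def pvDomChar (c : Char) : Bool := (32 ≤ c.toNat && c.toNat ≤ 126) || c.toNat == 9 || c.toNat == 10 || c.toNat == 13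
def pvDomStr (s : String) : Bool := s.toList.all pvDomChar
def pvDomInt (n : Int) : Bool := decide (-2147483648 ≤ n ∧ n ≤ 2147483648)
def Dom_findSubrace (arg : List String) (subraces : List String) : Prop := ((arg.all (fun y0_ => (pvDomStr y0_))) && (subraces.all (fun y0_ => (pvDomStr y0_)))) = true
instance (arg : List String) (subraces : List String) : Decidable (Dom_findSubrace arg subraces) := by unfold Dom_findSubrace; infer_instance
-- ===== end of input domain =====

-- B replaces A's forward keep-last-overwrite scan with a backwards early-exit search (simpler decomposition; same cost).


-- ===== PORT A =====
def findSubrace (arg : List String) (subraces : List String) : String :=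
  let subrace := arg.foldl (fun subrace a =>
    if PySem.Str.isIn "subrace-" a then
      let x := ((PySem.Str.split? a "-").getD [])
      let t := (PySem.List.pyGet? x 1).getD ""   -- x[1]; "subrace-" in a guarantees a "-", so pyGet? is some
      if subraces.contains t then t else subrace
    else subrace) ""
  if subrace == "" then (PySem.List.pyGet? subraces 0).getD "" else subrace  -- subraces[0]; Pre_ excludes subraces = []

-- ===== PORT B =====
def findSubraceAltLoop (subraces : List String) : List String → Option String
  | [] => none
  | a :: rest =>
    if PySem.Str.isIn "subrace-" a then
      let t := (PySem.List.pyGet? (((PySem.Str.split? a "-").getD [])) 1).getD ""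
      if subraces.contains t then some t else findSubraceAltLoop subraces rest
    else findSubraceAltLoop subraces rest

def findSubrace_alt (arg : List String) (subraces : List String) : String :=
  match findSubraceAltLoop subraces arg.reverse with
  | some t => t
  | none => (PySem.List.pyGet? subraces 0).getD ""

-- ===== PRECONDITION & SPEC =====
-- the tag a contributes and the test A/B both apply
def pvTag (a : String) : String := (PySem.List.pyGet? (((PySem.Str.split? a "-").getD [])) 1).getD ""
-- Pre_ excludes subraces = [] (A raises IndexError: no element can ever match the empty list, so the
-- subraces[0] default is always reached) and the defensible corner where "" is an accepted subrace and some
-- arg element carries an empty tag: there A's ""-sentinel conflates the matched empty tag with "no match".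
def Pre_findSubrace (arg : List String) (subraces : List String) : Prop :=
  subraces ≠ [] ∧
    ¬("" ∈ subraces ∧ ∃ a ∈ arg, PySem.Str.isIn "subrace-" a = true ∧ pvTag a = "")
instance (arg : List String) (subraces : List String) : Decidable (Pre_findSubrace arg subraces) := by unfold Pre_findSubrace; infer_instance
def pvWitness_findSubrace : List String × List String := (["subrace-elf", "foo"], ["elf", "dwarf"])

def Spec_findSubrace (arg : List String) (subraces : List String) (out : String) : Prop := out = findSubrace_alt arg subraces
instance (arg : List String) (subraces : List String) (out : String) : Decidable (Spec_findSubrace arg subraces out) := by unfold Spec_findSubrace; infer_instance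

-- ===== CLAIM (what is proved, stated in full; the proofs are below) =====
def Claim_equal_findSubrace : Prop := ∀ (arg : List String) (subraces : List String), Dom_findSubrace arg subraces → Pre_findSubrace arg subraces → Spec_findSubrace arg subraces (findSubrace arg subraces)

-- ===== LEMMAS AND PROOFS =====

def pvPred (subraces : List String) (a : String) : Bool :=
  PySem.Str.isIn "subrace-" a && subraces.contains (pvTag a)

theorem altLoop_eq_find? (subraces : List String) (l : List String) :
    findSubraceAltLoop subraces l = (l.find? (pvPred subraces)).map pvTag := by
  induction l with
  | nil => rfl
  | cons a rest ih =>
      simp only [findSubraceAltLoop, List.find?, pvPred, pvTag]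
      by_cases h1 : PySem.Str.isIn "subrace-" a = true <;>
        by_cases h2 : subraces.contains ((PySem.List.pyGet? (((PySem.Str.split? a "-").getD [])) 1).getD "") = true <;>
        simp_all [pvTag]

theorem foldA_eq_find? (subraces : List String) (l : List String) (s : String) :
    l.foldl (fun subrace a =>
      if PySem.Str.isIn "subrace-" a then
        let x := ((PySem.Str.split? a "-").getD [])
        let t := (PySem.List.pyGet? x 1).getD ""
        if subraces.contains t then t else subrace
      else subrace) s
    = ((l.reverse.find? (pvPred subraces)).map pvTag).getD s := by
  induction l generalizing s with
  | nil => rfl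
  | cons a rest ih =>
      simp only [List.foldl_cons, ih, List.reverse_cons, List.find?_append]
      cases hf : rest.reverse.find? (pvPred subraces) with
      | some b => simp
      | none =>
          simp only [Option.none_or, List.find?]
          by_cases h1 : PySem.Str.isIn "subrace-" a = true <;>
            by_cases h2 : subraces.contains ((PySem.List.pyGet? (((PySem.Str.split? a "-").getD [])) 1).getD "") = true <;>
            simp_all [pvPred, pvTag]

-- ===== VERDICT (by name: the statement is the Claim_ definition above) =====
theorem findSubrace_spec : Claim_equal_findSubrace := by
  intro arg subraces _ hpre
  unfold Spec_findSubrace findSubrace findSubrace_alt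
  rw [foldA_eq_find?, altLoop_eq_find?]
  cases hf : arg.reverse.find? (pvPred subraces) with
  | none => simp
  | some b =>
      have hb : pvPred subraces b = true := List.find?_some hf
      have hmem : pvTag b ∈ subraces := by
        have : subraces.contains (pvTag b) = true := by
          simp only [pvPred, Bool.and_eq_true] at hb; exact hb.2
        simpa using this
      have hbm : b ∈ arg := by
        have := List.mem_of_find?_eq_some hf; simpa using this
      have hne : pvTag b ≠ "" := by
        intro h
        exact hpre.2 ⟨h ▸ hmem, b, hbm, by
          simp only [pvPred, Bool.and_eq_true] at hb; exact hb.1, h⟩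
      simp [hne]
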